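-- pv_equiv track=rewrite | github.com/shreeyakhurana/ACSL-2018-2019-Programming-Contest | contest 2/Khurana s2.py | secondAlg
-- ===== SOURCE A (Python) =====
-- def secondAlg(com1, com2):
--     com2List = []
--     common = ""
--     for c in com2:
--         if(c != ' '):
--             com2List.append(c)
--     for i in range(len(com1)):
--         if com1[i] in com2List:
--             common = common + com1[i]
--
--             index = com2List.index(com1[i])
--             for k in range(index+1):
--                 com2List.pop(0)
--     if(common == ""):
--         common = "NONE"
--
--     return common
-- ===== SOURCE B (Python) =====
-- def secondAlg(com1, com2):
--     t = [ch for ch in com2 if ch != ' ']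
--     pos = {}
--     for j, ch in enumerate(t):
--         pos.setdefault(ch, []).append(j)
--     p = 0
--     out = ""
--     for c in com1:
--         lst = pos.get(c, [])
--         j = bisect_left(lst, p)
--         if j < len(lst):
--             out += c
--             p = lst[j] + 1
--     return out if out else "NONE"
--
--
-- def bisect_left(lst, x):
--     lo, hi = 0, len(lst)
--     while lo < hi:
--         mid = (lo + hi) // 2
--         if lst[mid] < x:
--             lo = mid + 1
--         else:
--             hi = mid
--     return lo
-- ===== Notes on version B (the rewrite author's own statement) =====
-- stated objective: faster
-- what changed: Replaces the per-character membership scan + list.index + one-by-one front pops (O(n*m)) by a single pass that precomputes, per character, the sorted list of its positions in the space-filtered com2 and advances a pointer via binary search (O(m + n log m)).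
import Mathlib
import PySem

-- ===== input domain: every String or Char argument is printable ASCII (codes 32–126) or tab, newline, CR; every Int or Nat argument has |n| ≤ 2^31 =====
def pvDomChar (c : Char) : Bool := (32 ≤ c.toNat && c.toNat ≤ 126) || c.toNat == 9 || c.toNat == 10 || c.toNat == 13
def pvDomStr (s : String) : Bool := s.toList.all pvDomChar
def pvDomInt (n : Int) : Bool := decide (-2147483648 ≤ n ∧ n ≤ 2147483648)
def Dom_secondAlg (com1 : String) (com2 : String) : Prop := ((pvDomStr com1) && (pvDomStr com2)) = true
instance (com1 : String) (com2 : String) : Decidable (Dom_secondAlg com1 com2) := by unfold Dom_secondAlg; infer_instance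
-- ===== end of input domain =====

-- B replaces A's per-character membership scan + .index + front-pops by per-character
-- sorted position lists over the space-filtered com2 plus a binary search (objective: faster).

-- ===== PORT A =====
-- 'for k in range(index+1): com2List.pop(0)' — pops the front index+1 times
def pvPopFront : Nat → List Char → List Char
  | 0, l => l
  | n + 1, l => pvPopFront n l.tail

def pvStepA (st : List Char × String) (c : Char) : List Char × String :=
  if st.1.contains c then
    let index := (PySem.List.index? st.1 c).getD 0   -- .index after the 'in' check: always found
    (pvPopFront (index + 1) st.1, st.2.push c)
  else st

def secondAlg (com1 : String) (com2 : String) : String :=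
  let com2List := com2.toList.foldl (fun acc c => if c ≠ ' ' then acc ++ [c] else acc) []
  let r := com1.toList.foldl pvStepA (com2List, "")
  if r.2 = "" then "NONE" else r.2

-- ===== PORT B =====
-- hand-written bisect_left from Source B; lst[mid] is always in range (0 ≤ lo ≤ mid < hi ≤ len), so getD is exact
def pvBisect (lst : List Int) (x : Int) (lo hi : Nat) : Nat :=
  if h : lo < hi then
    let mid := (lo + hi) / 2
    if lst.getD mid 0 < x then pvBisect lst x (mid + 1) hi
    else pvBisect lst x lo mid
  else lo
termination_by hi - lo
decreasing_by all_goals omega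

-- pos.setdefault(ch, []).append(j)
def pvPos (t : List Char) : PySem.Dict Char (List Int) :=
  (PySem.List.enumerate t 0).foldl
    (fun d jc => d.insert jc.2 (d.getD jc.2 [] ++ [jc.1])) PySem.Dict.empty

def pvStepB (pos : PySem.Dict Char (List Int)) (st : Int × String) (c : Char) : Int × String :=
  let lst := pos.getD c []
  let j := pvBisect lst st.1 0 lst.length
  if j < lst.length then (lst.getD j 0 + 1, st.2.push c)   -- lst[j]: j < len(lst) checked, getD exact
  else st

def secondAlg_alt (com1 : String) (com2 : String) : String :=
  let t := com2.toList.filter (fun ch => ch ≠ ' ')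
  let r := com1.toList.foldl (pvStepB (pvPos t)) (0, "")
  if r.2 = "" then "NONE" else r.2

-- ===== PRECONDITION & SPEC =====
def Spec_secondAlg (com1 : String) (com2 : String) (out : String) : Prop := out = secondAlg_alt com1 com2
instance (com1 : String) (com2 : String) (out : String) : Decidable (Spec_secondAlg com1 com2 out) := by unfold Spec_secondAlg; infer_instance

-- ===== CLAIM (what is proved, stated in full; the proofs are below) =====
def Claim_equal_secondAlg : Prop := ∀ (com1 : String) (com2 : String), Dom_secondAlg com1 com2 → Spec_secondAlg com1 com2 (secondAlg com1 com2)

-- ===== LEMMAS AND PROOFS =====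

-- positions (as Python ints) of c in t, in increasing order
def pvOcc (t : List Char) (c : Char) : List Int :=
  ((PySem.List.enumerate t 0).filter (fun jc => jc.2 == c)).map (·.1)

lemma pvPopFront_eq_drop (n : Nat) (l : List Char) : pvPopFront n l = l.drop n := by
  induction n generalizing l with
  | zero => simp [pvPopFront]
  | succ k ih => simp [pvPopFront, ih, List.drop_tail]

lemma pvFilter_fold_gen (l : List Char) (acc : List Char) :
    l.foldl (fun acc c => if c ≠ ' ' then acc ++ [c] else acc) acc = acc ++ l.filter (fun ch => ch ≠ ' ') := by
  induction l generalizing acc with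
  | nil => simp
  | cons x xs ih =>
    simp only [List.foldl_cons, List.filter_cons]
    by_cases hx : x = ' '
    · rw [if_neg (by simp [hx]), ih]; simp [hx]
    · rw [if_pos (by simp [hx]), ih]; simp [hx]

lemma pvFilter_fold (l : List Char) :
    l.foldl (fun acc c => if c ≠ ' ' then acc ++ [c] else acc) [] = l.filter (fun ch => ch ≠ ' ') := by
  simpa using pvFilter_fold_gen l []

lemma pvPos_getD_gen (l : List (Int × Char)) (d : PySem.Dict Char (List Int)) (c : Char) :
    (l.foldl (fun d jc => d.insert jc.2 (d.getD jc.2 [] ++ [jc.1])) d).getD c []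
      = d.getD c [] ++ (l.filter (fun jc => jc.2 == c)).map (·.1) := by
  induction l generalizing d with
  | nil => simp
  | cons x xs ih =>
    simp only [List.foldl_cons, List.filter_cons, ih]
    by_cases hx : x.2 = c
    · simp [hx]
    · simp [PySem.Dict.getD_insert, hx, Ne.symm hx]

lemma pvPos_getD (t : List Char) (c : Char) : (pvPos t).getD c [] = pvOcc t c := by
  simpa [pvPos, pvOcc] using pvPos_getD_gen (PySem.List.enumerate t 0) PySem.Dict.empty c

lemma pvOcc_sorted (t : List Char) (c : Char) : (pvOcc t c).Pairwise (· < ·) := by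
  unfold pvOcc
  rw [List.pairwise_map]
  exact (PySem.List.pairwise_lt_enumerate t 0).filter _

lemma pvOcc_mem (t : List Char) (c : Char) (y : Int) :
    y ∈ pvOcc t c ↔ ∃ (k : Nat) (hk : k < t.length), y = (k : Int) ∧ t[k] = c := by
  unfold pvOcc
  simp only [List.mem_map, List.mem_filter, PySem.List.mem_enumerate_iff]
  constructor
  · rintro ⟨jc, ⟨⟨k, hk, rfl⟩, h2⟩, rfl⟩
    exact ⟨k, hk, by simp, by simpa using h2⟩
  · rintro ⟨k, hk, rfl, hc⟩
    exact ⟨(0 + (k : Int), t[k]), ⟨⟨k, hk, rfl⟩, by simpa using hc⟩, by simp⟩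

lemma pvSorted_getD (lst : List Int) (sorted : lst.Pairwise (· ≤ ·)) (i j : Nat)
    (hij : i ≤ j) (hj : j < lst.length) : lst.getD i 0 ≤ lst.getD j 0 := by
  rw [List.getD_eq_getElem lst 0 (lt_of_le_of_lt hij hj), List.getD_eq_getElem lst 0 hj]
  rcases Nat.lt_or_ge i j with h | h
  · exact List.pairwise_iff_getElem.mp sorted i j _ _ h
  · have : i = j := le_antisymm hij h
    subst this; exact le_refl _

lemma pvBisect_spec (lst : List Int) (x : Int) (sorted : lst.Pairwise (· ≤ ·)) :
    ∀ (n lo hi : Nat), hi - lo ≤ n → lo ≤ hi → hi ≤ lst.length →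
      lo ≤ pvBisect lst x lo hi ∧ pvBisect lst x lo hi ≤ hi ∧
      (∀ j, lo ≤ j → j < pvBisect lst x lo hi → lst.getD j 0 < x) ∧
      (∀ j, pvBisect lst x lo hi ≤ j → j < hi → x ≤ lst.getD j 0) := by
  intro n
  induction n with
  | zero =>
    intro lo hi hn hlo hhi
    have heq : lo = hi := by omega
    subst heq
    rw [pvBisect]
    simp only [dif_neg (lt_irrefl lo)]
    refine ⟨le_refl _, le_refl _, ?_, ?_⟩ <;> intro j h1 h2 <;> omega
  | succ m ih =>
    intro lo hi hn hlo hhi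
    rw [pvBisect]
    by_cases h : lo < hi
    · rw [dif_pos h]
      set mid := (lo + hi) / 2 with hmid
      have hm1 : lo ≤ mid := by omega
      have hm2 : mid < hi := by omega
      by_cases hc : lst.getD mid 0 < x
      · rw [if_pos hc]
        obtain ⟨i1, i2, i3, i4⟩ := ih (mid + 1) hi (by omega) (by omega) hhi
        refine ⟨by omega, i2, ?_, i4⟩
        intro j hj1 hj2
        rcases Nat.lt_or_ge j (mid + 1) with hj | hj
        · calc lst.getD j 0 ≤ lst.getD mid 0 := pvSorted_getD lst sorted j mid (by omega) (by omega)
            _ < x := hc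
        · exact i3 j hj hj2
      · rw [if_neg hc]
        obtain ⟨i1, i2, i3, i4⟩ := ih lo mid (by omega) (by omega) (by omega)
        refine ⟨i1, by omega, i3, ?_⟩
        intro j hj1 hj2
        rcases Nat.lt_or_ge j mid with hj | hj
        · exact i4 j hj1 hj
        · calc x ≤ lst.getD mid 0 := not_lt.mp hc
            _ ≤ lst.getD j 0 := pvSorted_getD lst sorted mid j hj (by omega)
    · simp only [dif_neg h]
      refine ⟨le_refl _, by omega, ?_, ?_⟩ <;> intro j h1 h2 <;> omega

-- the bridge: bisect on pvOcc finds the first occurrence of c in t at index ≥ p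
lemma pvKey (t : List Char) (c : Char) (p : Nat) :
    (pvBisect (pvOcc t c) (p : Int) 0 (pvOcc t c).length < (pvOcc t c).length →
      ∃ q : Nat, (pvOcc t c).getD (pvBisect (pvOcc t c) (p : Int) 0 (pvOcc t c).length) 0 = (q : Int) ∧
        p ≤ q ∧ q < t.length ∧ PySem.List.index? (t.drop p) c = some (q - p)) ∧
    (pvBisect (pvOcc t c) (p : Int) 0 (pvOcc t c).length = (pvOcc t c).length → c ∉ t.drop p) := by
  set occ := pvOcc t c with hocc
  set r := pvBisect occ (p : Int) 0 occ.length with hr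
  have sorted : occ.Pairwise (· ≤ ·) := (pvOcc_sorted t c).imp le_of_lt
  have strict : occ.Pairwise (· < ·) := pvOcc_sorted t c
  obtain ⟨b1, b2, b3, b4⟩ := pvBisect_spec occ (p : Int) sorted occ.length 0 occ.length (by omega) (by omega) (le_refl _)
  constructor
  · intro hrlt
    have hmem : occ[r] ∈ occ := List.getElem_mem hrlt
    obtain ⟨q, hq, hqv, hqc⟩ := (pvOcc_mem t c _).mp hmem
    have hgetD : occ.getD r 0 = (q : Int) := by rw [List.getD_eq_getElem occ 0 hrlt, hqv]
    have hpq : p ≤ q := by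
      have := b4 r (le_refl _) hrlt
      rw [hgetD] at this
      exact_mod_cast this
    refine ⟨q, hgetD, hpq, hq, ?_⟩
    rw [PySem.List.index?_eq_idxOf?, List.idxOf?_eq_some_iff]
    have hlen : q - p < (t.drop p).length := by simp; omega
    refine ⟨hlen, ?_, ?_⟩
    · rw [List.getElem_drop]
      have : p + (q - p) = q := by omega
      simp only [this]
      exact hqc
    · intro j hj hcontra
      rw [List.getElem_drop] at hcontra
      have hmem2 : ((p + j : Nat) : Int) ∈ occ := by
        rw [pvOcc_mem]
        exact ⟨p + j, by simp at hlen ⊢; omega, rfl, hcontra⟩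
      obtain ⟨j', hj', hval⟩ := List.mem_iff_getElem.mp hmem2
      rcases Nat.lt_or_ge j' r with hlt | hge
      · have := b3 j' (Nat.zero_le _) hlt
        rw [List.getD_eq_getElem occ 0 hj', hval] at this
        have : p + j < p := by exact_mod_cast this
        omega
      · have hle : occ[r] ≤ occ[j'] := by
          rcases Nat.lt_or_ge r j' with hltr | hger
          · exact le_of_lt (List.pairwise_iff_getElem.mp strict r j' hrlt hj' hltr)
          · have : r = j' := by omega
            subst this; exact le_refl _
        rw [hqv, hval] at hle
        have : q ≤ p + j := by exact_mod_cast hle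
        omega
  · intro hreq hmem
    obtain ⟨i, hi, hiv⟩ := List.mem_iff_getElem.mp hmem
    rw [List.getElem_drop] at hiv
    have hmem2 : ((p + i : Nat) : Int) ∈ occ := by
      rw [pvOcc_mem]
      exact ⟨p + i, by simp at hi; omega, rfl, hiv⟩
    obtain ⟨j', hj', hval⟩ := List.mem_iff_getElem.mp hmem2
    have := b3 j' (Nat.zero_le _) (by omega)
    rw [List.getD_eq_getElem occ 0 hj', hval] at this
    have : p + i < p := by exact_mod_cast this
    omega

lemma pvStep_corr (t : List Char) (c : Char) (p : Nat) (s : String) :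
    pvStepA (t.drop p, s) c =
      ((t.drop (pvStepB (pvPos t) ((p : Int), s) c).1.toNat,
        (pvStepB (pvPos t) ((p : Int), s) c).2)) ∧
    0 ≤ (pvStepB (pvPos t) ((p : Int), s) c).1 := by
  unfold pvStepB
  simp only [pvPos_getD]
  obtain ⟨key1, key2⟩ := pvKey t c p
  set occ := pvOcc t c with hocc
  set r := pvBisect occ (p : Int) 0 occ.length with hr
  obtain ⟨b1, b2, b3, b4⟩ := pvBisect_spec occ (p : Int) ((pvOcc_sorted t c).imp le_of_lt)
    occ.length 0 occ.length (by omega) (by omega) (le_refl _)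
  by_cases hcase : r < occ.length
  · obtain ⟨q, hgetD, hpq, hq, hidx⟩ := key1 hcase
    have hcmem : c ∈ t.drop p := by
      have := PySem.List.index?_isSome_iff (t.drop p) c
      rw [hidx] at this
      simpa using this
    have hcontains : (t.drop p).contains c = true := List.contains_iff_mem.mpr hcmem
    simp only [hcase, if_pos]
    unfold pvStepA
    simp only [hcontains, if_pos, hidx, Option.getD_some, hgetD]
    constructor
    · congr 1
      · rw [pvPopFront_eq_drop, List.drop_drop]
        congr 1
        have : ((q : Int) + 1).toNat = q + 1 := by omega
        rw [this]
        omega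
    · omega
  · have hreq : r = occ.length := by omega
    have hnmem : c ∉ t.drop p := key2 hreq
    have hcontains : (t.drop p).contains c = false := by
      simp [hnmem]
    rw [if_neg hcase]
    unfold pvStepA
    refine ⟨?_, Int.natCast_nonneg p⟩
    simp only [hcontains, Bool.false_eq_true, if_false, Int.toNat_natCast]

lemma pvFold_corr (cs : List Char) (t : List Char) (p : Nat) (s : String) :
    cs.foldl pvStepA (t.drop p, s) =
      ((t.drop (cs.foldl (pvStepB (pvPos t)) ((p : Int), s)).1.toNat,
        (cs.foldl (pvStepB (pvPos t)) ((p : Int), s)).2)) := by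
  induction cs generalizing p s with
  | nil => simp
  | cons c cs ih =>
    simp only [List.foldl_cons]
    obtain ⟨h1, h2⟩ := pvStep_corr t c p s
    rw [h1]
    have hcast : (pvStepB (pvPos t) ((p : Int), s) c).1 = (((pvStepB (pvPos t) ((p : Int), s) c).1.toNat : Nat) : Int) := by omega
    rw [ih (pvStepB (pvPos t) ((p : Int), s) c).1.toNat (pvStepB (pvPos t) ((p : Int), s) c).2, ← hcast]

-- ===== VERDICT (by name: the statement is the Claim_ definition above) =====
theorem secondAlg_spec : Claim_equal_secondAlg := by
  intro com1 com2 _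
  unfold Spec_secondAlg secondAlg secondAlg_alt
  simp only [pvFilter_fold]
  have h := pvFold_corr com1.toList (com2.toList.filter (fun ch => ch ≠ ' ')) 0 ""
  simp only [List.drop_zero, Nat.cast_zero] at h
  simp only [h]
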